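-- pv_equiv track=rewrite | github.com/yeqingyan/Sentiment_MaxEnt | MaxEntTrainData.py | emoji_analysis
-- ===== SOURCE A (Python) =====
-- def emoji_analysis(match_str, emoji_re):
--     """ Return text's emoji sentiment result """
--     emoji_count = [0,0,0]
--     for match_moji in match_str:
--         if match_moji in emoji_re["pos_emoji"]:
--             emoji_count[2] += 1
--         if match_moji in emoji_re["neu_emoji"]:
--             emoji_count[1] += 1
--         if match_moji in emoji_re["neg_emoji"]:
--             emoji_count[0] += 1
--     if emoji_count.count(0) != 2:
--         # Discard text if it contain more than 1 polarity
--         return -2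
--     elif emoji_count[0] > 0:
--         # Negative tweets
--         return -1
--     elif emoji_count[2] > 0:
--         # Positive tweets
--         return 1
--     elif emoji_count[1] > 0:
--         # Neutrial tweets
--         return 0
-- ===== SOURCE B (Python) =====
-- def emoji_analysis(match_str, emoji_re):
--     """ Return text's emoji sentiment result """
--     has_neg = any(m in emoji_re["neg_emoji"] for m in match_str)
--     has_neu = any(m in emoji_re["neu_emoji"] for m in match_str)
--     has_pos = any(m in emoji_re["pos_emoji"] for m in match_str)
--     if has_neg + has_neu + has_pos != 1:
--         # zero or more than one polarity present
--         return -2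
--     if has_neg:
--         return -1
--     return 1 if has_pos else 0
-- ===== Notes on version B (the rewrite author's own statement) =====
-- stated objective: simpler
-- what changed: Replaces the three-counter accumulation loop plus the count(0)!=2 zero-counting test with three short-circuiting presence scans (has_neg/has_neu/has_pos) and a direct 'exactly one polarity present' test; only presence matters for the result, so the counts are never built.
import Mathlib
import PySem

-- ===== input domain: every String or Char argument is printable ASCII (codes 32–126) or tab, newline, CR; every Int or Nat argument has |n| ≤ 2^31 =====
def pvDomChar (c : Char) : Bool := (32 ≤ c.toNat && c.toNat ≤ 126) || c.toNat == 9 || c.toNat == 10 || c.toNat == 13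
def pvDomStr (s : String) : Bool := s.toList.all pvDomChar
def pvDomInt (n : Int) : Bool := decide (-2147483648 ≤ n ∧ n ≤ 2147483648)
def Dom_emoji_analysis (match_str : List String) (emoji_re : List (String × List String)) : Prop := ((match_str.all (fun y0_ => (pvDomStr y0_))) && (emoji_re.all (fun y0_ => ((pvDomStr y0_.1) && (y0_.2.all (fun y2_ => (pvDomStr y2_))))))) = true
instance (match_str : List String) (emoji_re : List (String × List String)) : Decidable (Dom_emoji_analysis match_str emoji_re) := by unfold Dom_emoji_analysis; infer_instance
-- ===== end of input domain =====

-- B replaces A's three-counter loop + zero-counting with three short-circuiting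
-- presence scans and an "exactly one polarity present" test (objective: simpler).


-- shared helper: first-match lookup in the association list (Python dict access emoji_re[k])
def lookupKey (emoji_re : List (String × List String)) (k : String) : Option (List String) :=
  (emoji_re.find? (fun p => p.1 == k)).map Prod.snd

-- ===== PORT A =====
-- the loop body: one step of A's for-loop over match_str (KeyError → none)
def aStep (emoji_re : List (String × List String)) (acc : Option (Int × Int × Int))
    (m : String) : Option (Int × Int × Int) :=
  acc.bind fun c =>
    (lookupKey emoji_re "pos_emoji").bind fun pos =>
      (lookupKey emoji_re "neu_emoji").bind fun neu =>
        (lookupKey emoji_re "neg_emoji").bind fun neg =>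
          some (if m ∈ neg then c.1 + 1 else c.1,
                if m ∈ neu then c.2.1 + 1 else c.2.1,
                if m ∈ pos then c.2.2 + 1 else c.2.2)

def emoji_analysis (match_str : List String) (emoji_re : List (String × List String)) : Option Int :=
  match match_str.foldl (aStep emoji_re) (some (0, 0, 0)) with
  | none => none
  | some (c0, c1, c2) =>
    if ([c0, c1, c2].count 0 ≠ 2) then some (-2)
    else if c0 > 0 then some (-1)
    else if c2 > 0 then some 1
    else if c1 > 0 then some 0
    else none

-- ===== PORT B =====
-- any(m in emoji_re[k] for m in match_str): the generator touches emoji_re[k] only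
-- when match_str is non-empty (so the empty list never raises)
def hasPolarity (match_str : List String) (emoji_re : List (String × List String))
    (k : String) : Option Bool :=
  match match_str with
  | [] => some false
  | _ => (lookupKey emoji_re k).map (fun l => match_str.any (fun m => m ∈ l))

def emoji_analysis_alt (match_str : List String) (emoji_re : List (String × List String)) : Option Int :=
  (hasPolarity match_str emoji_re "neg_emoji").bind fun hn =>
    (hasPolarity match_str emoji_re "neu_emoji").bind fun hu =>
      (hasPolarity match_str emoji_re "pos_emoji").bind fun hp =>
        if (cond hn 1 0) + (cond hu 1 0) + (cond hp 1 0) ≠ (1 : Int) then some (-2)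
        else if hn then some (-1)
        else if hp then some 1
        else some 0

-- ===== PRECONDITION & SPEC =====
-- Pre_ excludes exactly the KeyError inputs: a non-empty match_str with one of the
-- three polarity keys missing from emoji_re (A raises there, no value is returned).
def Pre_emoji_analysis (match_str : List String) (emoji_re : List (String × List String)) : Prop :=
  match_str = [] ∨
    ((lookupKey emoji_re "pos_emoji").isSome ∧ (lookupKey emoji_re "neu_emoji").isSome ∧
      (lookupKey emoji_re "neg_emoji").isSome)
instance (match_str : List String) (emoji_re : List (String × List String)) : Decidable (Pre_emoji_analysis match_str emoji_re) := by unfold Pre_emoji_analysis; infer_instance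

def pvWitness_emoji_analysis : List String × (List (String × List String)) :=
  (["a", "b"], [("pos_emoji", ["a"]), ("neu_emoji", []), ("neg_emoji", ["c"])])

def Spec_emoji_analysis (match_str : List String) (emoji_re : List (String × List String)) (out : Option Int) : Prop := out = emoji_analysis_alt match_str emoji_re
instance (match_str : List String) (emoji_re : List (String × List String)) (out : Option Int) : Decidable (Spec_emoji_analysis match_str emoji_re out) := by unfold Spec_emoji_analysis; infer_instance

-- ===== CLAIM (what is proved, stated in full; the proofs are below) =====
def Claim_equal_emoji_analysis : Prop := ∀ (match_str : List String) (emoji_re : List (String × List String)), Dom_emoji_analysis match_str emoji_re → Pre_emoji_analysis match_str emoji_re → Spec_emoji_analysis match_str emoji_re (emoji_analysis match_str emoji_re)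

-- ===== LEMMAS AND PROOFS =====

-- A's loop, with all three lookups succeeding, accumulates membership counts
theorem aLoop_counts (ms : List String) (emoji_re : List (String × List String))
    (pos neu neg : List String)
    (hp : lookupKey emoji_re "pos_emoji" = some pos)
    (hu : lookupKey emoji_re "neu_emoji" = some neu)
    (hn : lookupKey emoji_re "neg_emoji" = some neg)
    (a b c : Int) :
    ms.foldl (aStep emoji_re) (some (a, b, c)) =
      some (a + (ms.countP (fun m => m ∈ neg) : Int),
            b + (ms.countP (fun m => m ∈ neu) : Int),
            c + (ms.countP (fun m => m ∈ pos) : Int)) := by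
  induction ms generalizing a b c with
  | nil => simp
  | cons x xs ih =>
    simp only [List.foldl_cons, aStep, hp, hu, hn, Option.bind_some, ih, List.countP_cons]
    by_cases h1 : x ∈ neg <;> by_cases h2 : x ∈ neu <;> by_cases h3 : x ∈ pos <;>
      simp [h1, h2, h3] <;> omega

-- ===== VERDICT (by name: the statement is the Claim_ definition above) =====

theorem emoji_analysis_spec : Claim_equal_emoji_analysis := by
  intro ms er _ hpre
  unfold Spec_emoji_analysis
  rcases hpre with h | ⟨hp, hu, hn⟩
  · subst h; rfl
  · rcases Option.isSome_iff_exists.mp hp with ⟨pos, hp⟩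
    rcases Option.isSome_iff_exists.mp hu with ⟨neu, hu⟩
    rcases Option.isSome_iff_exists.mp hn with ⟨neg, hn⟩
    have hc := aLoop_counts ms er pos neu neg hp hu hn 0 0 0
    cases ms with
    | nil => rfl
    | cons x xs =>
      simp only [emoji_analysis, emoji_analysis_alt, hc, hasPolarity, hp, hu, hn,
        Option.map_some, Option.bind_some]
      set ms := x :: xs
      have eneg : ((0 : Int) + (ms.countP (fun m => m ∈ neg) : Int) = 0) ↔
          ms.any (fun m => m ∈ neg) = false := by
        simp [List.countP_eq_zero, List.any_eq_false]
      have eneu : ((0 : Int) + (ms.countP (fun m => m ∈ neu) : Int) = 0) ↔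
          ms.any (fun m => m ∈ neu) = false := by
        simp [List.countP_eq_zero, List.any_eq_false]
      have epos : ((0 : Int) + (ms.countP (fun m => m ∈ pos) : Int) = 0) ↔
          ms.any (fun m => m ∈ pos) = false := by
        simp [List.countP_eq_zero, List.any_eq_false]
      have hzn : (0 : Int) ≤ 0 + (ms.countP (fun m => m ∈ neg) : Int) := by positivity
      have hzu : (0 : Int) ≤ 0 + (ms.countP (fun m => m ∈ neu) : Int) := by positivity
      have hzp : (0 : Int) ≤ 0 + (ms.countP (fun m => m ∈ pos) : Int) := by positivity
      cases han : ms.any (fun m => m ∈ neg) <;> cases hau : ms.any (fun m => m ∈ neu) <;>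
        cases hap : ms.any (fun m => m ∈ pos) <;>
        simp_all [List.count_cons, List.count_nil]
      all_goals rw [if_neg (by push Not; exact eneg), if_neg (by push Not; exact epos)]
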